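-- pv_equiv track=rewrite | github.com/S0ngRu1/data-factory-songrui-job | app/model/labelstudio_to_bio_ner.py | process_bio_ocr_ner
-- ===== SOURCE A (Python) =====
-- from typing import List
--
-- def process_bio_ocr_ner(results:List):
--     first_ci_index,last_ci_index = 0,len(results)-1
--     # 过滤掉所有非实体且非特殊字符的标签
--     for i,result in enumerate(results):
--         parts = result.split("\t")
--         if len(parts) < 2:
--             continue
--         if 'CI' in parts[1] :
--             first_ci_index = i
--             break
--     for i,result in enumerate(results[::-1]):
--         parts = result.split("\t")
--         if len(parts) < 2:
--             continue
--         if 'CI' in parts[1] :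
--             last_ci_index = len(results)-i
--             break
--
--     return results[first_ci_index:last_ci_index]
-- ===== SOURCE B (Python) =====
-- def process_bio_ocr_ner(results):
--     # One forward pass keeping two markers instead of two opposite-direction scans.
--     first = None
--     last = None
--     for i, result in enumerate(results):
--         parts = result.split("\t")
--         if len(parts) < 2:
--             continue
--         if 'CI' in parts[1]:
--             if first is None:
--                 first = i
--             last = i + 1
--     if first is None:
--         first = 0
--     if last is None:
--         last = len(results) - 1
--     return results[first:last]
-- ===== Notes on version B (the rewrite author's own statement) =====
-- stated objective: alternative
-- what changed: Replaces A's two opposite-direction early-breaking scans (forward for the first CI line, over the reversed list for the last) by a single forward pass that maintains a first-hit marker and a one-past-last-hit marker, then slices once with the same defaults (0 and len-1).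
import Mathlib
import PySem

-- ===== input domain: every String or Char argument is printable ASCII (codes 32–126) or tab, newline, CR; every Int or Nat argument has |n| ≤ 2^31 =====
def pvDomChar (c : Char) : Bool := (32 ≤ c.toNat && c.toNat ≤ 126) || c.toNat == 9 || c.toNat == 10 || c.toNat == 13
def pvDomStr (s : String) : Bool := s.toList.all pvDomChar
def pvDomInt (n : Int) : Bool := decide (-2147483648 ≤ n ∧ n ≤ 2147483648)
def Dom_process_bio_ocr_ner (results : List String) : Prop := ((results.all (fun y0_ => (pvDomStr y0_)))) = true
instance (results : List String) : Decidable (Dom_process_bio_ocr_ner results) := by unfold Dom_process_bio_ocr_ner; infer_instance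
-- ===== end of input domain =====

-- B replaces A's two opposite-direction early-breaking scans by ONE forward pass keeping two markers (simpler decomposition, same O(n) cost).

-- the loop-body test shared verbatim by both Pythons: parts = s.split("\t"); len(parts) >= 2 and 'CI' in parts[1]
def pvCI (s : String) : Bool :=
  let parts := (PySem.Str.split? s "\t").getD []   -- sep ≠ "" so split? is always some
  if parts.length < 2 then false
  else PySem.Str.isIn "CI" (PySem.List.pyGetD parts 1 "")

-- ===== PORT A =====
-- A's 'for i,result in enumerate(…): … break' loop, shared verbatim by both of A's scans
def pvAscan : List String → Int → Option Int
  | [], _ => none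
  | s :: rest, i => if pvCI s then some i else pvAscan rest (i + 1)

def process_bio_ocr_ner (results : List String) : List String :=
  let n : Int := results.length
  let first_ci_index : Int := (pvAscan results 0).getD 0
  -- second loop runs over results[::-1] (= results.reverse) and sets last = len(results) - i on the first hit
  let last_ci_index : Int :=
    match pvAscan results.reverse 0 with
    | some i => n - i
    | none => n - 1
  PySem.List.slice results (some first_ci_index) (some last_ci_index)

-- ===== PORT B =====
-- B's single pass: first marker set once, last marker overwritten on every hit
def pvBscan : List String → Int → Option Int × Option Int → Option Int × Option Int
  | [], _, acc => acc
  | s :: rest, i, (f, l) =>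
      if pvCI s then
        pvBscan rest (i + 1) ((match f with | none => some i | some a => some a), some (i + 1))
      else
        pvBscan rest (i + 1) (f, l)

def process_bio_ocr_ner_alt (results : List String) : List String :=
  let fl := pvBscan results 0 (none, none)
  PySem.List.slice results (some (fl.1.getD 0)) (some (fl.2.getD ((results.length : Int) - 1)))

-- ===== PRECONDITION & SPEC =====
def Spec_process_bio_ocr_ner (results : List String) (out : List String) : Prop := out = process_bio_ocr_ner_alt results
instance (results : List String) (out : List String) : Decidable (Spec_process_bio_ocr_ner results out) := by unfold Spec_process_bio_ocr_ner; infer_instance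

-- ===== CLAIM (what is proved, stated in full; the proofs are below) =====
def Claim_equal_process_bio_ocr_ner : Prop := ∀ (results : List String), Dom_process_bio_ocr_ner results → Spec_process_bio_ocr_ner results (process_bio_ocr_ner results)

-- ===== LEMMAS AND PROOFS =====

-- A's scan is findIdx?, offset by the start counter
theorem pvAscan_eq_findIdx? (xs : List String) (i : Int) :
    pvAscan xs i = (List.findIdx? pvCI xs).map (fun k => i + (k : Int)) := by
  induction xs generalizing i with
  | nil => simp [pvAscan]
  | cons s rest ih =>
      by_cases h : pvCI s
      · simp [pvAscan, h, List.findIdx?_cons]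
      · simp [pvAscan, h, List.findIdx?_cons, ih]
        cases List.findIdx? pvCI rest <;> (simp; try ring)

-- B's first marker: set at the first hit (when the accumulator starts at none)
theorem pvBscan_fst (xs : List String) (i : Int) (f l : Option Int) :
    (pvBscan xs i (f, l)).1 =
      match f with
      | some a => some a
      | none => (List.findIdx? pvCI xs).map (fun k => i + (k : Int)) := by
  induction xs generalizing i f l with
  | nil => cases f <;> simp [pvBscan]
  | cons s rest ih =>
      by_cases h : pvCI s
      · cases f <;> simp [pvBscan, h, ih, List.findIdx?_cons]
      · cases f with
        | none =>
            simp [pvBscan, h, ih, List.findIdx?_cons]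
            cases List.findIdx? pvCI rest <;> (simp; try ring)
        | some a =>
            simp [pvBscan, h, ih]

-- B's last marker: one past the LAST hit, i.e. read off the reversed list's first hit
theorem pvBscan_snd (xs : List String) (i : Int) (f l : Option Int) :
    (pvBscan xs i (f, l)).2 =
      match List.findIdx? pvCI xs.reverse with
      | some j => some (i + ((xs.length : Int) - (j : Int)))
      | none => l := by
  induction xs generalizing i f l with
  | nil => simp [pvBscan]
  | cons s rest ih =>
      have hrev : (s :: rest).reverse = rest.reverse ++ [s] := by simp
      by_cases h : pvCI s
      · simp only [pvBscan, if_pos h]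
        rw [ih, hrev, List.findIdx?_append]
        cases hfr : List.findIdx? pvCI rest.reverse with
        | some j =>
            have hj : j < rest.reverse.length := List.findIdx?_eq_some_iff_getElem.mp hfr |>.1
            simp at hj
            simp [List.findIdx?_cons, h]
            omega
        | none => simp [List.findIdx?_cons, h]
      · simp only [pvBscan, if_neg h]
        rw [ih, hrev, List.findIdx?_append]
        cases hfr : List.findIdx? pvCI rest.reverse with
        | some j =>
            have hj : j < rest.reverse.length := List.findIdx?_eq_some_iff_getElem.mp hfr |>.1
            simp at hj
            simp
            omega
        | none => simp [List.findIdx?_cons, h]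

-- ===== VERDICT (by name: the statement is the Claim_ definition above) =====
theorem process_bio_ocr_ner_spec : Claim_equal_process_bio_ocr_ner := by
  intro results _
  show process_bio_ocr_ner results = process_bio_ocr_ner_alt results
  simp only [process_bio_ocr_ner, process_bio_ocr_ner_alt,
    pvAscan_eq_findIdx?, pvBscan_fst, pvBscan_snd]
  cases h1 : List.findIdx? pvCI results with
  | some k =>
      cases h2 : List.findIdx? pvCI results.reverse with
      | some j => simp
      | none =>
          exfalso
          obtain ⟨hlt, hk, -⟩ := List.findIdx?_eq_some_iff_getElem.mp h1
          have hmem : results[k]'hlt ∈ results.reverse := by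
            simp [List.getElem_mem]
          have := List.findIdx?_eq_none_iff.mp h2 _ hmem
          simp [hk] at this
  | none =>
      cases h2 : List.findIdx? pvCI results.reverse with
      | some j =>
          exfalso
          obtain ⟨hlt, hk, -⟩ := List.findIdx?_eq_some_iff_getElem.mp h2
          rw [List.getElem_reverse] at hk
          have hlt' : results.length - 1 - j < results.length := by
            simp at hlt; omega
          have := List.findIdx?_eq_none_iff.mp h1 (results[results.length - 1 - j]'hlt')
            (List.getElem_mem hlt')
          rw [hk] at this
          simp at this
      | none => simp
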